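-- pv_equiv track=rewrite | github.com/callmeonlyashu/AM-Data-Structures-and-Algorithms | problem_solving/advent_of_code_2024/day_4_copied.py | get_diagonal_wise_count
-- ===== SOURCE A (Python) =====
-- def get_diagonal_wise_count(arr, words, word_length):
--     diagonals = []
--     reverse_diagonals = []
--
--     # Collect diagonals from top-left to bottom-right
--     for d in range(-len(arr) + 1, len(arr[0])):
--         diagonals.append([arr[i][i - d] for i in range(len(arr)) if 0 <= i - d < len(arr[0])])
--
--     # Collect diagonals from top-right to bottom-left
--     for d in range(len(arr[0]) + len(arr) - 1):
--         reverse_diagonals.append([arr[i][d - i] for i in range(len(arr)) if 0 <= d - i < len(arr[0])])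
--
--     # Count matches in diagonals
--     count = 0
--     for diag in diagonals + reverse_diagonals:
--         for i in range(len(diag) - word_length + 1):
--             string = "".join(diag[i:i + word_length])
--             if string in words:
--                 count += 1
--     return count
-- ===== SOURCE B (Python) =====
-- def get_diagonal_wise_count(arr, words, word_length):
--     H, W = len(arr), len(arr[0])
--     diags = {}
--     antis = {}
--     for i in range(H):
--         for j in range(W):
--             cell = arr[i][j]
--             diags.setdefault(i - j, []).append(cell)
--             antis.setdefault(i + j, []).append(cell)
--     wordset = set(words)
--     segments = [diags.get(d, []) for d in range(-H + 1, W)] \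
--              + [antis.get(d, []) for d in range(W + H - 1)]
--     count = 0
--     for seg in segments:
--         if word_length <= len(seg):
--             for window in zip(*(seg[k:] for k in range(word_length))):
--                 if "".join(window) in wordset:
--                     count += 1
--     return count
-- ===== Notes on version B (the rewrite author's own statement) =====
-- stated objective: faster
-- what changed: B collects both diagonal families in one row-major pass that buckets every cell into two dicts keyed by i-j and i+j (A re-scans all row indices once per diagonal offset), and enumerates windows by zipping word_length shifted tails of each diagonal against a prebuilt word set instead of slicing by index and searching the word list.
-- outside the precondition, e.g. on get_diagonal_wise_count([['a']], [''], 0): A returns 4, B returns 0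
import Mathlib
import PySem

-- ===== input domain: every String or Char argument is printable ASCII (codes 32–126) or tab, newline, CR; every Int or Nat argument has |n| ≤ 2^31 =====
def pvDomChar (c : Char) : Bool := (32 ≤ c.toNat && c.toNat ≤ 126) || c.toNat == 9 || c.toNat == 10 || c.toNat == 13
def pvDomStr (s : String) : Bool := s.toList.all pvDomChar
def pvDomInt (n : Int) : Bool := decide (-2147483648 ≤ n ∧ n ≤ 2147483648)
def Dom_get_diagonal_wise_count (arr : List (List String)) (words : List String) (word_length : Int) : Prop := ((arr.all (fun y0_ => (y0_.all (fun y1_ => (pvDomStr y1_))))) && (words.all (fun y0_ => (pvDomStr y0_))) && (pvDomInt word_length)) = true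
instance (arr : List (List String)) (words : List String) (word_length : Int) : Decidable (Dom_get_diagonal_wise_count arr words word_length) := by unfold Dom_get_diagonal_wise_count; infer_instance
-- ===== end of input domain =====

-- B replaces A's per-offset scans over all row indices by one row-major bucketing pass into two dicts
-- (keys i-j and i+j) and enumerates windows by zipping word_length shifted tails against a word set
-- (measured faster by a constant factor). Equality is claimed for word_length ≥ 1 (see Pre_ comment).

-- ===== PORT A =====
-- len(arr) and len(arr[0]) (arr[0] of an empty arr is an IndexError, excluded by Pre_)
def pvH (arr : List (List String)) : Int := (arr.length : Int)
def pvW (arr : List (List String)) : Int := (((PySem.List.pyGet? arr 0).getD []).length : Int)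
-- arr[i][j] (in-range under Pre_; out-of-range defaults excluded by Pre_)
def pvCell (arr : List (List String)) (i j : Int) : String :=
  (PySem.List.pyGet? ((PySem.List.pyGet? arr i).getD []) j).getD ""
-- [arr[i][i - d] for i in range(len(arr)) if 0 <= i - d < len(arr[0])]
def pvDiagA (arr : List (List String)) (d : Int) : List String :=
  ((PySem.List.pyRange 0 (pvH arr) 1).filter
      (fun i => decide (0 ≤ i - d) && decide (i - d < pvW arr))).map
    (fun i => pvCell arr i (i - d))
-- [arr[i][d - i] for i in range(len(arr)) if 0 <= d - i < len(arr[0])]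
def pvAntiA (arr : List (List String)) (d : Int) : List String :=
  ((PySem.List.pyRange 0 (pvH arr) 1).filter
      (fun i => decide (0 ≤ d - i) && decide (d - i < pvW arr))).map
    (fun i => pvCell arr i (d - i))
-- the inner counting loop: for i in range(len(diag) - word_length + 1): ...
def pvInnerA (words : List String) (word_length : Int) (count : Int) (diag : List String) : Int :=
  (PySem.List.pyRange 0 ((diag.length : Int) - word_length + 1) 1).foldl
    (fun count i =>
      if words.contains (PySem.Str.join "" (PySem.List.slice diag (some i) (some (i + word_length))))
      then count + 1 else count)
    count

def get_diagonal_wise_count (arr : List (List String)) (words : List String) (word_length : Int) : Int :=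
  let diagonals := (PySem.List.pyRange (-(pvH arr) + 1) (pvW arr) 1).map (pvDiagA arr)
  let reverse_diagonals := (PySem.List.pyRange 0 (pvW arr + pvH arr - 1) 1).map (pvAntiA arr)
  (diagonals ++ reverse_diagonals).foldl (pvInnerA words word_length) 0

-- ===== PORT B =====
-- Python zip(*iterables) over lists of strings: stops at the shortest; zip() of no iterables is empty
def pvZip (ls : List (List String)) : List (List String) :=
  if h : ls = [] then []
  else if h2 : ls.all (fun l => !l.isEmpty) then
    (ls.map (fun l => l.headI)) :: pvZip (ls.map (fun l => l.tail))
  else []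
termination_by ls.headI.length
decreasing_by
  obtain ⟨a, t, rfl⟩ := List.exists_cons_of_ne_nil h
  have ha : a ≠ [] := by
    have := List.all_eq_true.mp h2 a (by simp)
    simpa using this
  simpa using Nat.sub_lt (List.length_pos_of_ne_nil ha) Nat.one_pos

-- the bucketing double loop: diags.setdefault(i-j, []).append(cell); antis.setdefault(i+j, []).append(cell)
def pvBuckets (arr : List (List String)) :
    PySem.Dict Int (List String) × PySem.Dict Int (List String) :=
  (PySem.List.pyRange 0 (pvH arr) 1).foldl
    (fun p i =>
      (PySem.List.pyRange 0 (pvW arr) 1).foldl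
        (fun p j =>
          let cell := pvCell arr i j
          (p.1.modify (i - j) [] (fun l => l ++ [cell]),
           p.2.modify (i + j) [] (fun l => l ++ [cell])))
        p)
    (PySem.Dict.empty, PySem.Dict.empty)
-- if word_length <= len(seg): zip(*(seg[k:] for k in range(word_length))) (else no window fits)
def pvWindows (word_length : Int) (seg : List String) : List (List String) :=
  if word_length ≤ (seg.length : Int) then
    pvZip ((PySem.List.pyRange 0 word_length 1).map (fun k => PySem.List.slice seg (some k) none))
  else []
-- the inner counting loop over windows
def pvInnerB (wordset : PySem.Set String) (word_length : Int) (count : Int) (seg : List String) : Int :=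
  (pvWindows word_length seg).foldl
    (fun count w => if PySem.Set.contains wordset (PySem.Str.join "" w) then count + 1 else count)
    count

def get_diagonal_wise_count_alt (arr : List (List String)) (words : List String) (word_length : Int) : Int :=
  let dicts := pvBuckets arr
  let wordset := PySem.Set.ofList words
  let segments :=
    (PySem.List.pyRange (-(pvH arr) + 1) (pvW arr) 1).map (fun d => dicts.1.getD d []) ++
    (PySem.List.pyRange 0 (pvW arr + pvH arr - 1) 1).map (fun d => dicts.2.getD d [])
  segments.foldl (pvInnerB wordset word_length) 0

-- ===== PRECONDITION & SPEC =====
-- Pre_ excludes (i) inputs where A raises: empty arr (IndexError on arr[0]) and grids with a row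
-- shorter than the first row (IndexError on arr[i][j]); and (ii) word_length ≤ 0, a meaningless
-- window size no caller of a word counter would specify, on which A's slice arithmetic wraps around
-- via negative indices and counts empty-string windows while B's zip naturally yields no windows.
def Pre_get_diagonal_wise_count (arr : List (List String)) (words : List String) (word_length : Int) : Prop :=
  arr ≠ [] ∧ (∀ row ∈ arr, arr.headI.length ≤ row.length) ∧ 1 ≤ word_length
instance (arr : List (List String)) (words : List String) (word_length : Int) : Decidable (Pre_get_diagonal_wise_count arr words word_length) := by unfold Pre_get_diagonal_wise_count; infer_instance

def pvWitness_get_diagonal_wise_count : List (List String) × List String × Int :=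
  ([["X", "M"], ["M", "X"]], ["XM", "MX", "XX"], 2)

def Spec_get_diagonal_wise_count (arr : List (List String)) (words : List String) (word_length : Int) (out : Int) : Prop := out = get_diagonal_wise_count_alt arr words word_length
instance (arr : List (List String)) (words : List String) (word_length : Int) (out : Int) : Decidable (Spec_get_diagonal_wise_count arr words word_length out) := by unfold Spec_get_diagonal_wise_count; infer_instance

-- ===== CLAIM (what is proved, stated in full; the proofs are below) =====
def Claim_equal_get_diagonal_wise_count : Prop := ∀ (arr : List (List String)) (words : List String) (word_length : Int), Dom_get_diagonal_wise_count arr words word_length → Pre_get_diagonal_wise_count arr words word_length → Spec_get_diagonal_wise_count arr words word_length (get_diagonal_wise_count arr words word_length)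

-- ===== LEMMAS AND PROOFS =====

lemma pv_flatMap_if {α : Type} (l : List Int) (p : Int → Bool) (f : Int → α) :
    l.flatMap (fun i => if p i then [f i] else []) = (l.filter p).map f := by
  induction l with
  | nil => simp
  | cons a t ih => simp only [List.flatMap_cons, List.filter_cons, ih]; split <;> simp

lemma pv_filter_range_diag (W i d : Int) :
    (PySem.List.pyRange 0 W 1).filter (fun j => i - j == d) =
      (if decide (0 ≤ i - d) && decide (i - d < W) then [i - d] else []) := by
  have h1 : (fun j : Int => i - j == d) = (fun j : Int => j == i - d) := by
    funext j
    apply Bool.eq_iff_iff.mpr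
    simp only [beq_iff_eq]
    omega
  rw [h1, List.filter_beq]
  by_cases hm : 0 ≤ i - d ∧ i - d < W
  · have hmem : (i - d) ∈ PySem.List.pyRange 0 W 1 :=
      PySem.List.mem_pyRange_one.mpr ⟨hm.1, hm.2⟩
    rw [List.count_eq_one_of_mem (PySem.List.nodup_pyRange_one 0 W) hmem]
    have hb : (decide (0 ≤ i - d) && decide (i - d < W)) = true := by
      simp only [Bool.and_eq_true, decide_eq_true_eq]; exact hm
    rw [if_pos hb]
    simp
  · have hnm : (i - d) ∉ PySem.List.pyRange 0 W 1 := by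
      intro hmem
      exact hm (PySem.List.mem_pyRange_one.mp hmem)
    rw [List.count_eq_zero.mpr hnm]
    by_cases h2 : 0 ≤ i - d <;> by_cases h3 : i - d < W <;> simp_all <;> omega

lemma pv_bucket_fst (arr : List (List String)) (d : Int) :
    (pvBuckets arr).1.getD d [] = pvDiagA arr d := by
  have hflat : pvBuckets arr =
      ((PySem.List.pyRange 0 (pvH arr) 1).flatMap
          (fun i => (PySem.List.pyRange 0 (pvW arr) 1).map (fun j => (i, j)))).foldl
        (fun (p : PySem.Dict Int (List String) × PySem.Dict Int (List String)) c =>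
          (p.1.modify (c.1 - c.2) [] (fun l => l ++ [pvCell arr c.1 c.2]),
           p.2.modify (c.1 + c.2) [] (fun l => l ++ [pvCell arr c.1 c.2])))
        (PySem.Dict.empty, PySem.Dict.empty) := by
    rw [List.foldl_flatMap]
    simp only [List.foldl_map]
    rfl
  rw [hflat,
    PySem.List.foldl_prod_mk
      (f := fun (dd : PySem.Dict Int (List String)) (c : Int × Int) =>
        dd.modify (c.1 - c.2) [] (fun l => l ++ [pvCell arr c.1 c.2]))
      (g := fun (dd : PySem.Dict Int (List String)) (c : Int × Int) =>
        dd.modify (c.1 + c.2) [] (fun l => l ++ [pvCell arr c.1 c.2]))]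
  show (((PySem.List.pyRange 0 (pvH arr) 1).flatMap
          (fun i => (PySem.List.pyRange 0 (pvW arr) 1).map (fun j => (i, j)))).foldl
        (fun (dd : PySem.Dict Int (List String)) (c : Int × Int) =>
          dd.modify (c.1 - c.2) [] (fun l => l ++ [pvCell arr c.1 c.2])) PySem.Dict.empty).getD d []
      = pvDiagA arr d
  rw [show (((PySem.List.pyRange 0 (pvH arr) 1).flatMap
          (fun i => (PySem.List.pyRange 0 (pvW arr) 1).map (fun j => (i, j)))).foldl
        (fun (dd : PySem.Dict Int (List String)) (c : Int × Int) =>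
          dd.modify (c.1 - c.2) [] (fun l => l ++ [pvCell arr c.1 c.2])) PySem.Dict.empty)
      = ((((PySem.List.pyRange 0 (pvH arr) 1).flatMap
          (fun i => (PySem.List.pyRange 0 (pvW arr) 1).map (fun j => (i, j)))).map
            (fun c => (c.1 - c.2, pvCell arr c.1 c.2))).foldl
        (fun (dd : PySem.Dict Int (List String)) (p : Int × String) =>
          dd.modify p.1 [] (fun l => l ++ [p.2])) PySem.Dict.empty)
    from (List.foldl_map (f := fun c : Int × Int => (c.1 - c.2, pvCell arr c.1 c.2)) (g := fun (dd : PySem.Dict Int (List String)) (p : Int × String) => dd.modify p.1 [] fun l => l ++ [p.2])).symm]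
  rw [PySem.Dict.getD_foldl_modify_append]
  rw [List.filter_map, List.map_map]
  simp only [PySem.Dict.getD_empty, List.nil_append]
  rw [List.filter_flatMap, List.map_flatMap]
  unfold pvDiagA
  rw [← pv_flatMap_if (l := PySem.List.pyRange 0 (pvH arr) 1)
    (p := fun i => decide (0 ≤ i - d) && decide (i - d < pvW arr))
    (f := fun i => pvCell arr i (i - d))]
  congr 1
  funext i
  simp only [Function.comp_def]
  rw [List.filter_map]
  simp only [Function.comp_def, List.map_map]
  rw [pv_filter_range_diag]
  by_cases hP : (decide (0 ≤ i - d) && decide (i - d < pvW arr)) = true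
  · rw [if_pos hP, if_pos hP]; simp
  · rw [if_neg hP, if_neg hP]; simp


lemma pv_filter_range_anti (W i d : Int) :
    (PySem.List.pyRange 0 W 1).filter (fun j => i + j == d) =
      (if decide (0 ≤ d - i) && decide (d - i < W) then [d - i] else []) := by
  have h1 : (fun j : Int => i + j == d) = (fun j : Int => j == d - i) := by
    funext j
    apply Bool.eq_iff_iff.mpr
    simp only [beq_iff_eq]
    omega
  rw [h1, List.filter_beq]
  by_cases hm : 0 ≤ d - i ∧ d - i < W
  · have hmem : (d - i) ∈ PySem.List.pyRange 0 W 1 :=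
      PySem.List.mem_pyRange_one.mpr ⟨hm.1, hm.2⟩
    rw [List.count_eq_one_of_mem (PySem.List.nodup_pyRange_one 0 W) hmem]
    have hb : (decide (0 ≤ d - i) && decide (d - i < W)) = true := by
      simp only [Bool.and_eq_true, decide_eq_true_eq]; exact hm
    rw [if_pos hb]
    simp
  · have hnm : (d - i) ∉ PySem.List.pyRange 0 W 1 := by
      intro hmem
      exact hm (PySem.List.mem_pyRange_one.mp hmem)
    rw [List.count_eq_zero.mpr hnm]
    by_cases h2 : 0 ≤ d - i <;> by_cases h3 : d - i < W <;> simp_all <;> omega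

lemma pv_bucket_snd (arr : List (List String)) (d : Int) :
    (pvBuckets arr).2.getD d [] = pvAntiA arr d := by
  have hflat : pvBuckets arr =
      ((PySem.List.pyRange 0 (pvH arr) 1).flatMap
          (fun i => (PySem.List.pyRange 0 (pvW arr) 1).map (fun j => (i, j)))).foldl
        (fun (p : PySem.Dict Int (List String) × PySem.Dict Int (List String)) c =>
          (p.1.modify (c.1 - c.2) [] (fun l => l ++ [pvCell arr c.1 c.2]),
           p.2.modify (c.1 + c.2) [] (fun l => l ++ [pvCell arr c.1 c.2])))
        (PySem.Dict.empty, PySem.Dict.empty) := by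
    rw [List.foldl_flatMap]
    simp only [List.foldl_map]
    rfl
  rw [hflat,
    PySem.List.foldl_prod_mk
      (f := fun (dd : PySem.Dict Int (List String)) (c : Int × Int) =>
        dd.modify (c.1 - c.2) [] (fun l => l ++ [pvCell arr c.1 c.2]))
      (g := fun (dd : PySem.Dict Int (List String)) (c : Int × Int) =>
        dd.modify (c.1 + c.2) [] (fun l => l ++ [pvCell arr c.1 c.2]))]
  show (((PySem.List.pyRange 0 (pvH arr) 1).flatMap
          (fun i => (PySem.List.pyRange 0 (pvW arr) 1).map (fun j => (i, j)))).foldl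
        (fun (dd : PySem.Dict Int (List String)) (c : Int × Int) =>
          dd.modify (c.1 + c.2) [] (fun l => l ++ [pvCell arr c.1 c.2])) PySem.Dict.empty).getD d []
      = pvAntiA arr d
  rw [show (((PySem.List.pyRange 0 (pvH arr) 1).flatMap
          (fun i => (PySem.List.pyRange 0 (pvW arr) 1).map (fun j => (i, j)))).foldl
        (fun (dd : PySem.Dict Int (List String)) (c : Int × Int) =>
          dd.modify (c.1 + c.2) [] (fun l => l ++ [pvCell arr c.1 c.2])) PySem.Dict.empty)
      = ((((PySem.List.pyRange 0 (pvH arr) 1).flatMap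
          (fun i => (PySem.List.pyRange 0 (pvW arr) 1).map (fun j => (i, j)))).map
            (fun c => (c.1 + c.2, pvCell arr c.1 c.2))).foldl
        (fun (dd : PySem.Dict Int (List String)) (p : Int × String) =>
          dd.modify p.1 [] (fun l => l ++ [p.2])) PySem.Dict.empty)
    from (List.foldl_map (f := fun c : Int × Int => (c.1 + c.2, pvCell arr c.1 c.2)) (g := fun (dd : PySem.Dict Int (List String)) (p : Int × String) => dd.modify p.1 [] fun l => l ++ [p.2])).symm]
  rw [PySem.Dict.getD_foldl_modify_append]
  rw [List.filter_map, List.map_map]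
  simp only [PySem.Dict.getD_empty, List.nil_append]
  rw [List.filter_flatMap, List.map_flatMap]
  unfold pvAntiA
  rw [← pv_flatMap_if (l := PySem.List.pyRange 0 (pvH arr) 1)
    (p := fun i => decide (0 ≤ d - i) && decide (d - i < pvW arr))
    (f := fun i => pvCell arr i (d - i))]
  congr 1
  funext i
  simp only [Function.comp_def]
  rw [List.filter_map]
  simp only [Function.comp_def, List.map_map]
  rw [pv_filter_range_anti]
  by_cases hP : (decide (0 ≤ d - i) && decide (d - i < pvW arr)) = true
  · rw [if_pos hP, if_pos hP]; simp
  · rw [if_neg hP, if_neg hP]; simp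

lemma pv_heads (seg : List String) (w : Nat) (h : w ≤ seg.length) :
    (List.range w).map (fun k => (seg.drop k).headI) = seg.take w := by
  induction w with
  | zero => simp
  | succ n ih =>
    have hn : n < seg.length := by omega
    rw [List.range_succ, List.map_append, ih (by omega), List.take_add_one,
        List.getElem?_eq_getElem hn]
    simp only [List.map_cons, List.map_nil]
    rw [← List.getElem_cons_drop hn]
    rfl

lemma pv_zipwin (w : Nat) (hw : 1 ≤ w) (seg : List String) :
    pvZip ((List.range w).map (fun k => seg.drop k)) =
      (List.range (seg.length + 1 - w)).map (fun k => (seg.drop k).take w) := by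
  induction seg with
  | nil =>
    rw [pvZip.eq_def]
    have hne : ¬ ((List.range w).map (fun k => ([] : List String).drop k) = []) := by
      simp; omega
    rw [dif_neg hne]
    have hall : ¬ (((List.range w).map (fun k => ([] : List String).drop k)).all
        (fun l => !l.isEmpty) = true) := by
      simp only [List.all_eq_true, List.mem_map]
      intro hc
      have := hc [] ⟨0, by simp; omega⟩
      simp at this
    rw [dif_neg hall]
    have : List.length ([] : List String) + 1 - w = 0 := by simp; omega
    rw [this]
    simp
  | cons x t ih =>
    by_cases hwl : w ≤ t.length + 1
    · rw [pvZip.eq_def]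
      have hne : ¬ ((List.range w).map (fun k => (x :: t).drop k) = []) := by
        simp; omega
      rw [dif_neg hne]
      have hall : ((List.range w).map (fun k => (x :: t).drop k)).all
          (fun l => !l.isEmpty) = true := by
        simp only [List.all_eq_true, List.mem_map]
        rintro l ⟨k, hk, rfl⟩
        simp only [List.mem_range] at hk
        have : k < (x :: t).length := by simp; omega
        simp [List.isEmpty_iff, ← List.length_pos_iff, List.length_drop]
        omega
      rw [dif_pos hall]
      have hheads : ((List.range w).map (fun k => (x :: t).drop k)).map (fun l => l.headI)
          = (x :: t).take w := by
        rw [List.map_map]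
        exact pv_heads (x :: t) w (by simpa using hwl)
      have htails : ((List.range w).map (fun k => (x :: t).drop k)).map (fun l => l.tail)
          = (List.range w).map (fun k => t.drop k) := by
        rw [List.map_map]
        apply List.map_congr_left
        intro k _
        simp only [Function.comp_def, List.tail_drop, List.drop_succ_cons]
      rw [hheads, htails, ih]
      have hlen : (x :: t).length + 1 - w = (t.length + 1 - w) + 1 := by
        simp; omega
      rw [hlen, List.range_succ_eq_map, List.map_cons, List.map_map]
      simp [Function.comp_def, List.drop_succ_cons]
    · rw [pvZip.eq_def]
      have hne : ¬ ((List.range w).map (fun k => (x :: t).drop k) = []) := by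
        simp; omega
      rw [dif_neg hne]
      have hall : ¬ (((List.range w).map (fun k => (x :: t).drop k)).all
          (fun l => !l.isEmpty) = true) := by
        simp only [List.all_eq_true, List.mem_map]
        intro hc
        have := hc ((x :: t).drop (t.length + 1)) ⟨t.length + 1, by simp; omega⟩
        simp at this
      rw [dif_neg hall]
      have : (x :: t).length + 1 - w = 0 := by simp; omega
      rw [this]
      simp

lemma pv_windows_eq (word_length : Int) (hw : 1 ≤ word_length) (seg : List String) :
    pvWindows word_length seg =
      (PySem.List.pyRange 0 ((seg.length : Int) - word_length + 1) 1).map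
        (fun i => PySem.List.slice seg (some i) (some (i + word_length))) := by
  obtain ⟨w, rfl⟩ : ∃ w : Nat, word_length = (w : Int) := ⟨word_length.toNat, (Int.toNat_of_nonneg (by omega)).symm⟩
  have hw1 : 1 ≤ w := by exact_mod_cast hw
  unfold pvWindows
  by_cases hle : (w : Int) ≤ (seg.length : Int)
  case neg =>
    rw [if_neg hle, PySem.List.pyRange_one_eq_nil (by omega)]
    simp
  rw [if_pos hle]
  rw [PySem.List.pyRange_one, PySem.List.pyRange_one]
  have e1 : ((w : Int) - 0).toNat = w := by omega
  have e2 : ((seg.length : Int) - (w : Int) + 1 - 0).toNat = seg.length + 1 - w := by omega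
  rw [e1, e2]
  rw [List.map_map, List.map_map]
  have h3 : ((fun k : Int => PySem.List.slice seg (some k) none) ∘ fun k : Nat => 0 + (k : Int))
      = fun k : Nat => seg.drop k := by
    funext k
    simp [PySem.List.slice_from_natCast]
  rw [h3, pv_zipwin w hw1 seg]
  apply List.map_congr_left
  intro k _
  simp only [Function.comp_def]
  have : (0 : Int) + (k : Int) + (w : Int) = ((k : Int) + (w : Int)) := by omega
  rw [show (0 : Int) + (k : Int) = ((k : Int)) by omega]
  rw [PySem.List.slice_natCast_add]

lemma pv_set_contains (words : List String) (x : String) :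
    PySem.Set.contains (PySem.Set.ofList words) x = words.contains x := by
  apply Bool.eq_iff_iff.mpr
  rw [PySem.Set.contains_iff, PySem.Set.mem_ofList, List.contains_iff_mem]

lemma pv_inner_eq (words : List String) (word_length : Int) (hw : 1 ≤ word_length)
    (c : Int) (seg : List String) :
    pvInnerA words word_length c seg = pvInnerB (PySem.Set.ofList words) word_length c seg := by
  unfold pvInnerA pvInnerB
  rw [pv_windows_eq word_length hw seg, List.foldl_map]
  apply PySem.List.foldl_congr_mem
  intro acc i _
  rw [pv_set_contains]

-- ===== VERDICT (by name: the statement is the Claim_ definition above) =====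
theorem get_diagonal_wise_count_spec : Claim_equal_get_diagonal_wise_count := by
  intro arr words word_length _ hpre
  obtain ⟨-, -, hw⟩ := hpre
  unfold Spec_get_diagonal_wise_count
  show ((PySem.List.pyRange (-(pvH arr) + 1) (pvW arr) 1).map (pvDiagA arr) ++
        (PySem.List.pyRange 0 (pvW arr + pvH arr - 1) 1).map (pvAntiA arr)).foldl
          (pvInnerA words word_length) 0 =
      ((PySem.List.pyRange (-(pvH arr) + 1) (pvW arr) 1).map (fun d => (pvBuckets arr).1.getD d []) ++
        (PySem.List.pyRange 0 (pvW arr + pvH arr - 1) 1).map (fun d => (pvBuckets arr).2.getD d [])).foldl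
          (pvInnerB (PySem.Set.ofList words) word_length) 0
  have e1 : (fun d => (pvBuckets arr).1.getD d []) = pvDiagA arr :=
    funext (pv_bucket_fst arr)
  have e2 : (fun d => (pvBuckets arr).2.getD d []) = pvAntiA arr :=
    funext (pv_bucket_snd arr)
  rw [e1, e2]
  have e3 : pvInnerA words word_length = pvInnerB (PySem.Set.ofList words) word_length :=
    funext fun c => funext fun seg => pv_inner_eq words word_length hw c seg
  rw [e3]
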